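-- pv_equiv track=rewrite | github.com/Lourencom/geometric-deep-learning-project | src/prompts.py | filter_prompts
-- ===== SOURCE A (Python) =====
-- def filter_prompts(prompts, prompt_difficulty, prompt_category, prompt_n_shots, model_size):
--     if prompt_difficulty is not None:
--         prompts = [p for p in prompts if prompt_difficulty in p]
--     if prompt_category is not None:
--         prompts = [p for p in prompts if prompt_category in p]
--     if prompt_n_shots is not None:
--         prompts = [p for p in prompts if prompt_n_shots in p]
--     if model_size is not None:
--         prompts = [p for p in prompts if model_size in p]
--     return prompts
-- ===== SOURCE B (Python) =====
-- def filter_prompts(prompts, prompt_difficulty, prompt_category, prompt_n_shots, model_size):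
--     conds = [v for v in (prompt_difficulty, prompt_category, prompt_n_shots, model_size) if v is not None]
--     return [p for p in prompts if all(c in p for c in conds)]
-- ===== Notes on version B (the rewrite author's own statement) =====
-- stated objective: simpler
-- what changed: B collects the non-None filters into a predicate list and makes a single all()-guarded pass over prompts, instead of A's four sequential conditional filtering passes that rebind the list.
import Mathlib
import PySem

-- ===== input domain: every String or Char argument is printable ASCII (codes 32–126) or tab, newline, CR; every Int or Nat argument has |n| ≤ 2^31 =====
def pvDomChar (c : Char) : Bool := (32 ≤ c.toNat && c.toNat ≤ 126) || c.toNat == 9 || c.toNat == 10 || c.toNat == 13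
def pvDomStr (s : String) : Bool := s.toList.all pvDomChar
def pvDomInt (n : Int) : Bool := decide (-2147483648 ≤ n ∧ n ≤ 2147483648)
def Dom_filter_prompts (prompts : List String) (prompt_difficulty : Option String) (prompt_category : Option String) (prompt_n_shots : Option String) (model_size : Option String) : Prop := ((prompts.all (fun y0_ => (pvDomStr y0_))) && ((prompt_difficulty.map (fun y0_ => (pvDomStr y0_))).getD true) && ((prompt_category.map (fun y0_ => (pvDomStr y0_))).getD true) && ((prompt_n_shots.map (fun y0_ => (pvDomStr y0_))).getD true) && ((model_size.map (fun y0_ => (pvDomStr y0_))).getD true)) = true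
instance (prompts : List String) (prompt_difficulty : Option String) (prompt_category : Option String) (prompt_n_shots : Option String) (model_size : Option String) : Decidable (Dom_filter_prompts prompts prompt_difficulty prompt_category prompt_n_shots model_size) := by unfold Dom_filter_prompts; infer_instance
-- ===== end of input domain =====

-- B (simpler): collects the non-None filters into one predicate list and filters prompts in a single all()-guarded pass, instead of A's four sequential conditional passes; no speed claim.


-- ===== PORT A =====
-- Port of A: four sequential conditional filtering passes, rebinding `prompts` each time.
def filter_prompts (prompts : List String) (prompt_difficulty : Option String) (prompt_category : Option String) (prompt_n_shots : Option String) (model_size : Option String) : List String :=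
  let prompts :=
    match prompt_difficulty with
    | none => prompts
    | some d => prompts.filter (fun p => PySem.Str.isIn d p)
  let prompts :=
    match prompt_category with
    | none => prompts
    | some c => prompts.filter (fun p => PySem.Str.isIn c p)
  let prompts :=
    match prompt_n_shots with
    | none => prompts
    | some n => prompts.filter (fun p => PySem.Str.isIn n p)
  let prompts :=
    match model_size with
    | none => prompts
    | some m => prompts.filter (fun p => PySem.Str.isIn m p)
  prompts

-- ===== PORT B =====
-- Port of B: gather the non-None conditions into a list, then one all()-guarded pass.
def filter_prompts_alt (prompts : List String) (prompt_difficulty : Option String) (prompt_category : Option String) (prompt_n_shots : Option String) (model_size : Option String) : List String :=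
  let conds := [prompt_difficulty, prompt_category, prompt_n_shots, model_size].filterMap id
  prompts.filter (fun p => conds.all (fun c => PySem.Str.isIn c p))

-- ===== PRECONDITION & SPEC =====
def Spec_filter_prompts (prompts : List String) (prompt_difficulty : Option String) (prompt_category : Option String) (prompt_n_shots : Option String) (model_size : Option String) (out : List String) : Prop := out = filter_prompts_alt prompts prompt_difficulty prompt_category prompt_n_shots model_size
instance (prompts : List String) (prompt_difficulty : Option String) (prompt_category : Option String) (prompt_n_shots : Option String) (model_size : Option String) (out : List String) : Decidable (Spec_filter_prompts prompts prompt_difficulty prompt_category prompt_n_shots model_size out) := by unfold Spec_filter_prompts; infer_instance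

-- ===== CLAIM (what is proved, stated in full; the proofs are below) =====
def Claim_equal_filter_prompts : Prop := ∀ (prompts : List String) (prompt_difficulty : Option String) (prompt_category : Option String) (prompt_n_shots : Option String) (model_size : Option String), Dom_filter_prompts prompts prompt_difficulty prompt_category prompt_n_shots model_size → Spec_filter_prompts prompts prompt_difficulty prompt_category prompt_n_shots model_size (filter_prompts prompts prompt_difficulty prompt_category prompt_n_shots model_size)

-- ===== LEMMAS AND PROOFS =====

-- ===== VERDICT (by name: the statement is the Claim_ definition above) =====
theorem filter_prompts_spec : Claim_equal_filter_prompts := by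
  intro prompts d c n m _
  unfold Spec_filter_prompts filter_prompts filter_prompts_alt
  rcases d with _ | d <;> rcases c with _ | c <;> rcases n with _ | n <;> rcases m with _ | m <;>
    simp [List.filter_filter, List.all_cons, Bool.and_comm, Bool.and_assoc]
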